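-- pv_equiv track=rewrite | github.com/Memblers/nesxidy | check_flash_cache.py | check_peephole_trim
-- ===== SOURCE A (Python) =====
-- def check_peephole_trim(code):
--     """Analyze a block's native code for peephole trim patterns.
--
--     With trim ON: PHA/PLA templates (13 bytes) should have their trailing PLP ($28) removed,
--     and a PLP should be flushed (re-inserted) before the next non-PHA/PLA instruction.
--
--     Without trim: every PHA/PLA template starts with PHP ($08) and ends with PLP ($28).
--
--     Returns analysis notes.
--     """
--     notes = []
--
--     # Count PHP/PLP pairs
--     php_count = sum(1 for b in code if b == 0x08)
--     plp_count = sum(1 for b in code if b == 0x28)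
--
--     if php_count != plp_count:
--         notes.append(f"  ⚠ PHP/PLP MISMATCH: {php_count} PHP vs {plp_count} PLP")
--
--     # Look for consecutive PHP...PLP PHP...PLP patterns (no trim)
--     # vs PHP...PHP (trimmed — missing PLP between them)
--     i = 0
--     template_starts = []
--     while i < len(code):
--         if code[i] == 0x08:  # PHP
--             template_starts.append(i)
--         i += 1
--
--     if len(template_starts) >= 2:
--         for j in range(len(template_starts) - 1):
--             gap_start = template_starts[j]
--             gap_end = template_starts[j+1]
--             # Check if there's a PLP ($28) between these two PHPs
--             gap = code[gap_start+1:gap_end]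
--             has_plp = 0x28 in gap
--             if not has_plp:
--                 notes.append(f"  ✂ TRIM detected: no PLP between PHP@{gap_start} and PHP@{gap_end} (saved 2 bytes)")
--             else:
--                 plp_pos = gap_start + 1 + list(gap).index(0x28)
--                 notes.append(f"  ○ PLP@{plp_pos} between PHP@{gap_start} and PHP@{gap_end} (no trim / flush)")
--
--     return notes
-- ===== SOURCE B (Python) =====
-- def check_peephole_trim(code):
--     """One-pass analysis: collect PHP/PLP positions once, then walk consecutive
--     PHP pairs with a single advancing pointer into the sorted PLP positions."""
--     notes = []
--     phps = []
--     plps = []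
--     for i, b in enumerate(code):
--         if b == 0x08:
--             phps.append(i)
--         elif b == 0x28:
--             plps.append(i)
--     if len(phps) != len(plps):
--         notes.append(f"  ⚠ PHP/PLP MISMATCH: {len(phps)} PHP vs {len(plps)} PLP")
--     k = 0
--     for a, b in zip(phps, phps[1:]):
--         while k < len(plps) and plps[k] <= a:
--             k += 1
--         if k < len(plps) and plps[k] < b:
--             notes.append(f"  ○ PLP@{plps[k]} between PHP@{a} and PHP@{b} (no trim / flush)")
--         else:
--             notes.append(f"  ✂ TRIM detected: no PLP between PHP@{a} and PHP@{b} (saved 2 bytes)")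
--     return notes
-- ===== Notes on version B (the rewrite author's own statement) =====
-- stated objective: faster
-- what changed: A rescans the code between every pair of PHP positions (slice + membership + index per pair); B collects PHP and PLP positions in one enumerate pass and walks the consecutive PHP pairs with a single advancing pointer into the sorted PLP positions.
import Mathlib
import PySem

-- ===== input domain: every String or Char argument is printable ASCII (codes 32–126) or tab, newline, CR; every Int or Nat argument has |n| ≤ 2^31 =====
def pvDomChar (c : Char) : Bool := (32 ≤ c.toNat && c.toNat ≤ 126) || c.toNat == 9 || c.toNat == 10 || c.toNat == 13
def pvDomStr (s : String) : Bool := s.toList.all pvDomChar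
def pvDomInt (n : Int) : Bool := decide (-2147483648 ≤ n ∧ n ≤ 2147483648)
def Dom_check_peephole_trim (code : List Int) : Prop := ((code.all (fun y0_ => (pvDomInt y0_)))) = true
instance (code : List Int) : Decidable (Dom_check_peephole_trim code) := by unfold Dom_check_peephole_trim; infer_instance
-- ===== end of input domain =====

-- B replaces A's per-PHP-pair slice-and-scan with one pass collecting PHP and PLP positions
-- and a single advancing pointer into the PLP positions; return values agree.

-- shared f-string helpers (identical literal text in both Pythons)
def pvMismatchNote (php plp : Int) : String :=
  "  ⚠ PHP/PLP MISMATCH: " ++ PySem.Int.toStr php ++ " PHP vs " ++ PySem.Int.toStr plp ++ " PLP"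

def pvTrimNote (a b : Int) : String :=
  "  ✂ TRIM detected: no PLP between PHP@" ++ PySem.Int.toStr a ++ " and PHP@" ++
    PySem.Int.toStr b ++ " (saved 2 bytes)"

def pvFlushNote (p a b : Int) : String :=
  "  ○ PLP@" ++ PySem.Int.toStr p ++ " between PHP@" ++ PySem.Int.toStr a ++ " and PHP@" ++
    PySem.Int.toStr b ++ " (no trim / flush)"

-- ===== PORT A =====
def check_peephole_trim (code : List Int) : List String :=
  let php_count : Int := code.foldl (fun acc b => if b == 8 then acc + 1 else acc) 0
  let plp_count : Int := code.foldl (fun acc b => if b == 40 then acc + 1 else acc) 0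
  let notes : List String :=
    if php_count ≠ plp_count then [pvMismatchNote php_count plp_count] else []
  -- 'i = 0; while i < len(code): if code[i] == 0x08: template_starts.append(i); i += 1'
  let template_starts : List Int :=
    (PySem.List.enumerate code 0).foldl (fun ts p => if p.2 == 8 then ts ++ [p.1] else ts) []
  if 2 ≤ template_starts.length then
    (PySem.List.pyRange 0 ((template_starts.length : Int) - 1) 1).foldl
      (fun notes j =>
        let gap_start := PySem.List.pyGetD template_starts j 0
        let gap_end := PySem.List.pyGetD template_starts (j + 1) 0
        let gap := PySem.List.slice code (some (gap_start + 1)) (some gap_end)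
        if !(gap.contains 40) then
          notes ++ [pvTrimNote gap_start gap_end]
        else
          let plp_pos := gap_start + 1 + (((PySem.List.index? gap 40).getD 0 : Nat) : Int)
          notes ++ [pvFlushNote plp_pos gap_start gap_end])
      notes
  else notes

-- ===== PORT B =====
-- 'while k < len(plps) and plps[k] <= a: k += 1'
def pvAdvance (plps : List Int) (a : Int) (k : Nat) : Nat :=
  if h : k < plps.length then
    if plps[k] ≤ a then pvAdvance plps a (k + 1) else k
  else k
termination_by plps.length - k

-- 'for a, b in zip(phps, phps[1:]): …'
def pvPairLoop (plps : List Int) : List (Int × Int) → Nat → List String → List String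
  | [], _, notes => notes
  | (a, b) :: rest, k, notes =>
    let k' := pvAdvance plps a k
    let note :=
      match plps[k']? with
      | some p => if p < b then pvFlushNote p a b else pvTrimNote a b
      | none => pvTrimNote a b
    pvPairLoop plps rest k' (notes ++ [note])

def check_peephole_trim_alt (code : List Int) : List String :=
  let pos := (PySem.List.enumerate code 0).foldl
      (fun st p =>
        if p.2 == 8 then (st.1 ++ [p.1], st.2)
        else if p.2 == 40 then (st.1, st.2 ++ [p.1]) else st) ([], [])
  let phps := pos.1
  let plps := pos.2
  let notes : List String :=
    if phps.length ≠ plps.length then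
      [pvMismatchNote (phps.length : Int) (plps.length : Int)] else []
  pvPairLoop plps (phps.zip phps.tail) 0 notes

-- ===== PRECONDITION & SPEC =====
def Spec_check_peephole_trim (code : List Int) (out : List String) : Prop := out = check_peephole_trim_alt code
instance (code : List Int) (out : List String) : Decidable (Spec_check_peephole_trim code out) := by unfold Spec_check_peephole_trim; infer_instance

-- ===== CLAIM (what is proved, stated in full; the proofs are below) =====
def Claim_equal_check_peephole_trim : Prop := ∀ (code : List Int), Dom_check_peephole_trim code → Spec_check_peephole_trim code (check_peephole_trim code)

-- ===== LEMMAS AND PROOFS =====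

-- Nat-level mirror of the position lists: positions (counting from s) of value v in l
def posN (l : List Int) (s : Nat) (v : Int) : List Nat :=
  match l with
  | [] => []
  | x :: t => if x == v then s :: posN t (s + 1) v else posN t (s + 1) v

lemma posN_ge (l : List Int) (s : Nat) (v : Int) : ∀ m ∈ posN l s v, s ≤ m := by
  induction l generalizing s with
  | nil => simp [posN]
  | cons x t ih =>
    intro m hm
    by_cases hx : x == v
    · simp only [posN, hx, if_true, List.mem_cons] at hm
      rcases hm with h | h
      · omega
      · have := ih (s + 1) m h; omega
    · simp only [posN, hx, Bool.false_eq_true, if_false] at hm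
      have := ih (s + 1) m hm; omega

lemma posN_pairwise (l : List Int) (s : Nat) (v : Int) :
    (posN l s v).Pairwise (· < ·) := by
  induction l generalizing s with
  | nil => simp [posN]
  | cons x t ih =>
    by_cases hx : x == v
    · simp only [posN, hx, if_true, List.pairwise_cons]
      exact ⟨fun m hm => by have := posN_ge t (s + 1) v m hm; omega, ih (s + 1)⟩
    · simp only [posN, hx, Bool.false_eq_true, if_false]
      exact ih (s + 1)

lemma enumFilter_eq_posN (l : List Int) (s : Nat) (v : Int) :
    ((PySem.List.enumerate l (s : Int)).filter (fun p => p.2 == v)).map (·.1)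
      = (posN l s v).map (fun (n : Nat) => (n : Int)) := by
  induction l generalizing s with
  | nil => simp [PySem.List.enumerate_nil, posN]
  | cons x t ih =>
    rw [PySem.List.enumerate_cons]
    have hs1 : ((s : Int) + 1) = ((s + 1 : Nat) : Int) := by push_cast; ring
    by_cases hx : x == v
    · simp only [posN, hx, if_true, List.filter_cons, List.map_cons, hs1, ih]
    · simp only [posN, hx, List.filter_cons, hs1]
      simp only [hx, Bool.false_eq_true, if_false]
      exact ih (s + 1)

-- the A-side collect loop
lemma foldA_collect (e : List (Int × Int)) (ts : List Int) :
    e.foldl (fun ts p => if p.2 == 8 then ts ++ [p.1] else ts) ts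
      = ts ++ (e.filter (fun p => p.2 == 8)).map (·.1) := by
  induction e generalizing ts with
  | nil => simp
  | cons p rest ih =>
    rw [List.foldl_cons]
    by_cases hp : p.2 == 8
    · rw [if_pos hp, ih]
      simp [List.filter_cons, hp]
    · rw [if_neg hp, ih]
      simp [List.filter_cons, hp]

-- the B-side collect loop
lemma foldB_collect (e : List (Int × Int)) (ts ps : List Int) :
    e.foldl (fun st (p : Int × Int) =>
        if p.2 == 8 then (st.1 ++ [p.1], st.2)
        else if p.2 == 40 then (st.1, st.2 ++ [p.1]) else st) (ts, ps)
      = (ts ++ (e.filter (fun p => p.2 == 8)).map (·.1),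
         ps ++ (e.filter (fun p => p.2 == 40)).map (·.1)) := by
  induction e generalizing ts ps with
  | nil => simp
  | cons p rest ih =>
    rw [List.foldl_cons]
    by_cases h8 : p.2 == 8
    · have h40 : ¬(p.2 == 40) := by simp only [beq_iff_eq] at h8 ⊢; omega
      rw [if_pos h8, ih]
      simp [List.filter_cons, h8, h40]
    · by_cases h40 : p.2 == 40
      · rw [if_neg h8, if_pos h40, ih]
        simp [List.filter_cons, h8, h40]
      · rw [if_neg h8, if_neg h40, ih]
        simp [List.filter_cons, h8, h40]

-- a 0/1 count is the length of the position list
lemma count_eq_posN_length (l : List Int) (v : Int) (s : Nat) :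
    l.count v = (posN l s v).length := by
  induction l generalizing s with
  | nil => simp [posN]
  | cons x t ih =>
    by_cases hx : x == v
    · simp only [beq_iff_eq] at hx
      simp [posN, hx, ih (s + 1)]
    · simp only [beq_iff_eq] at hx
      simp [posN, hx, ih (s + 1)]

-- first index of v in a take-prefix (Python: list(gap).index(v) on the slice)
lemma idxOf?_take (t : List Int) (v : Int) (k : Nat) :
    List.idxOf? v (t.take k) = (List.idxOf? v t).bind (fun i => if i < k then some i else none) := by
  induction t generalizing k with
  | nil => simp
  | cons x xs ih =>
    cases k with
    | zero =>
      simp only [List.take_zero, List.idxOf?_nil]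
      cases h : List.idxOf? v (x :: xs) <;> simp
    | succ k =>
      rw [List.take_succ_cons, List.idxOf?_cons, List.idxOf?_cons]
      by_cases hx : x == v
      · simp [hx]
      · rw [if_neg hx, if_neg hx, ih]
        cases h : List.idxOf? v xs with
        | none => simp
        | some i =>
          by_cases hik : i < k <;> simp [hik]

-- B-side search characterisation: first position of v strictly greater than m
lemma find_posN_eq_idxOf?_drop (l : List Int) (v : Int) (m : Nat) : ∀ (s : Nat),
    (posN l s v).find? (fun p => decide (m < p))
      = (List.idxOf? v (l.drop (m + 1 - s))).map (fun j => max s (m + 1) + j) := by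
  induction l with
  | nil => simp [posN]
  | cons x t ih =>
    intro s
    by_cases hx : x == v
    · by_cases hm : m < s
      · have h0 : m + 1 - s = 0 := by omega
        have hmax : max s (m + 1) = s := by omega
        rw [h0, List.drop_zero, List.idxOf?_cons, if_pos hx, hmax]
        simp only [posN, hx, if_true, List.find?_cons]
        simp [hm]
      · have hd : (x :: t).drop (m + 1 - s) = t.drop (m - s) := by
          have h2 : m + 1 - s = (m - s) + 1 := by omega
          rw [h2, List.drop_succ_cons]
        have hd2 : m + 1 - (s + 1) = m - s := by omega
        have hmax : max s (m + 1) = m + 1 := by omega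
        have hmax2 : max (s + 1) (m + 1) = m + 1 := by omega
        simp only [posN, hx, if_true, List.find?_cons]
        have hms : (decide (m < s)) = false := by simp [hm]
        rw [hms]
        simpa [hd, hd2, hmax, hmax2] using ih (s + 1)
    · simp only [posN, hx, Bool.false_eq_true, if_false]
      rw [ih (s + 1)]
      by_cases hs : s ≤ m
      · have hd : (x :: t).drop (m + 1 - s) = t.drop (m - s) := by
          have h2 : m + 1 - s = (m - s) + 1 := by omega
          rw [h2, List.drop_succ_cons]
        have hd2 : m + 1 - (s + 1) = m - s := by omega
        have hmax : max s (m + 1) = m + 1 := by omega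
        have hmax2 : max (s + 1) (m + 1) = m + 1 := by omega
        rw [hd2, hd, hmax, hmax2]
      · have h0 : m + 1 - s = 0 := by omega
        have h02 : m + 1 - (s + 1) = 0 := by omega
        have hmax : max s (m + 1) = s := by omega
        have hmax2 : max (s + 1) (m + 1) = s + 1 := by omega
        rw [h0, h02, hmax, hmax2, List.drop_zero, List.drop_zero, List.idxOf?_cons, if_neg hx]
        cases h : List.idxOf? v t <;> simp [h]
        omega

-- the advancing pointer: everything skipped is ≤ a, the pointed element (if any) is > a
lemma pvAdvance_spec (plps : List Int) (a : Int) (k : Nat)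
    (hinv : ∀ i (h : i < plps.length), i < k → plps[i] ≤ a) :
    (∀ i (h : i < plps.length), i < pvAdvance plps a k → plps[i] ≤ a) ∧
    (∀ (h : pvAdvance plps a k < plps.length), a < plps[pvAdvance plps a k]) := by
  rw [pvAdvance]
  by_cases h : k < plps.length
  · rw [dif_pos h]
    by_cases hle : plps[k] ≤ a
    · rw [if_pos hle]
      exact pvAdvance_spec plps a (k + 1)
        (fun i hi hik => by
          by_cases hk : i = k
          · subst hk; exact hle
          · exact hinv i hi (by omega))
    · rw [if_neg hle]
      exact ⟨fun i hi hik => hinv i hi hik, fun _ => by omega⟩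
  · rw [dif_neg h]
    exact ⟨fun i hi hik => hinv i hi hik, fun hk => absurd hk h⟩
termination_by plps.length - k

-- find? from a pointwise description
lemma find?_eq_of_getElem {α : Type} (l : List α) (p : α → Bool) : ∀ (r : Nat),
    (∀ i (h : i < l.length), i < r → p l[i] = false) →
    (∀ (h : r < l.length), p l[r] = true) →
    l.find? p = l[r]? := by
  induction l with
  | nil => simp
  | cons x t ih =>
    intro r hle hr
    cases r with
    | zero =>
      have := hr (by simp)
      simp only [List.getElem_cons_zero] at this
      simp [List.find?_cons, this]
    | succ r =>
      have hx : p x = false := by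
        have := hle 0 (by simp) (by omega)
        simpa using this
      simp only [List.find?_cons, hx, cond_false, List.getElem?_cons_succ]
      exact ih r (fun i h hlt => by
          have := hle (i + 1) (by simpa using h) (by omega)
          simpa using this)
        (fun h => by
          have := hr (by simpa using h)
          simpa using this)

-- an index loop over consecutive pairs is a fold over zip with the tail
lemma foldRZN (g : List String → Int → Int → List String) :
    ∀ (ts : List Int) (notes : List String),
    (List.range (ts.length - 1)).foldl
        (fun ns j => g ns (ts.getD j 0) (ts.getD (j + 1) 0)) notes
      = (ts.zip ts.tail).foldl (fun ns ab => g ns ab.1 ab.2) notes := by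
  intro ts
  induction ts with
  | nil => simp
  | cons x t ih =>
    intro notes
    cases t with
    | nil => simp
    | cons y u =>
      simp only [List.length_cons, Nat.add_sub_cancel, List.range_succ_eq_map,
        List.foldl_cons, List.foldl_map]
      simp only [List.getD_cons_zero, List.getD_cons_succ, List.zip_cons_cons, List.tail_cons]
      have ih' := ih (g notes x y)
      simp only [List.length_cons, Nat.add_sub_cancel, List.getD_cons_succ, List.tail_cons] at ih'
      rw [List.foldl_cons, ← ih']

-- casts commute with the B-side search
lemma find?_map_cast (P : List Nat) (a : Nat) :
    (P.map (fun (n : Nat) => (n : Int))).find? (fun p => decide ((a : Int) < p))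
      = (P.find? (fun p => decide (a < p))).map (fun (n : Nat) => (n : Int)) := by
  induction P with
  | nil => simp
  | cons x t ih =>
    simp only [List.map_cons, List.find?_cons]
    by_cases h : a < x
    · simp [h]
    · simp [h, ih]

-- the per-pair loops of A and B agree
lemma pairLoop_eq (code : List Int) : ∀ (ph : List Nat) (k : Nat) (notes : List String),
    ph.Pairwise (· < ·) →
    (∀ i (h : i < ((posN code 0 40).map (fun (n : Nat) => (n : Int))).length), i < k →
        ∀ a ∈ ph.head?, ((posN code 0 40).map (fun (n : Nat) => (n : Int)))[i] ≤ (a : Int)) →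
    ((ph.map (fun (n : Nat) => (n : Int))).zip ((ph.map (fun (n : Nat) => (n : Int))).tail)).foldl
      (fun notes ab =>
        let gap := PySem.List.slice code (some (ab.1 + 1)) (some ab.2)
        if !(gap.contains 40) then notes ++ [pvTrimNote ab.1 ab.2]
        else notes ++ [pvFlushNote (ab.1 + 1 + (((PySem.List.index? gap 40).getD 0 : Nat) : Int)) ab.1 ab.2])
      notes
    = pvPairLoop ((posN code 0 40).map (fun (n : Nat) => (n : Int)))
        ((ph.map (fun (n : Nat) => (n : Int))).zip ((ph.map (fun (n : Nat) => (n : Int))).tail)) k notes := by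
  intro ph
  induction ph with
  | nil => intro k notes _ _; simp [pvPairLoop]
  | cons a t ih =>
    intro k notes hpw hinv
    cases t with
    | nil => simp [pvPairLoop]
    | cons b rest =>
      have hab : a < b := (List.pairwise_cons.mp hpw).1 b (by simp)
      set L := (posN code 0 40).map (fun (n : Nat) => (n : Int)) with hL
      have hinv' : ∀ i (h : i < L.length), i < k → L[i] ≤ (a : Int) := by
        intro i hi hik
        exact hinv i hi hik a rfl
      obtain ⟨c1, c2⟩ := pvAdvance_spec L (a : Int) k hinv'
      set k' := pvAdvance L (a : Int) k with hk'
      -- the pointed element is the first PLP position strictly after a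
      have hfind : L.find? (fun p => decide ((a : Int) < p)) = L[k']? := by
        apply find?_eq_of_getElem
        · intro i hi hik
          have := c1 i hi hik
          simp only [decide_eq_false_iff_not, not_lt]
          exact this
        · intro h
          have := c2 h
          simpa using this
      have hfind2 : L[k']?
          = (List.idxOf? 40 (code.drop (a + 1))).map (fun j => ((a + 1 + j : Nat) : Int)) := by
        rw [← hfind, hL, find?_map_cast, find_posN_eq_idxOf?_drop code 40 a 0]
        simp only [Nat.sub_zero, Nat.zero_max, Option.map_map, Function.comp_def]
      -- the A-side slice
      have hgap : PySem.List.slice code (some ((a : Int) + 1)) (some (b : Int))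
          = (code.drop (a + 1)).take (b - (a + 1)) := by
        have hcast : ((a : Int) + 1) = ((a + 1 : Nat) : Int) := by push_cast; ring
        rw [hcast, PySem.List.slice_natCast]
      have hidx : List.idxOf? 40 ((code.drop (a + 1)).take (b - (a + 1)))
          = (List.idxOf? 40 (code.drop (a + 1))).bind
              (fun i => if i < b - (a + 1) then some i else none) :=
        idxOf?_take (code.drop (a + 1)) 40 (b - (a + 1))
      -- one step on both sides
      simp only [List.map_cons, List.tail_cons, List.zip_cons_cons, List.foldl_cons, pvPairLoop]
      rw [← hk']
      have hnote :
          (let gap := PySem.List.slice code (some ((a : Int) + 1)) (some (b : Int))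
           if !(gap.contains 40) then notes ++ [pvTrimNote (a : Int) (b : Int)]
           else notes ++ [pvFlushNote ((a : Int) + 1 + (((PySem.List.index? gap 40).getD 0 : Nat) : Int)) (a : Int) (b : Int)])
          = notes ++ [match L[k']? with
              | some p => if p < (b : Int) then pvFlushNote p (a : Int) (b : Int) else pvTrimNote (a : Int) (b : Int)
              | none => pvTrimNote (a : Int) (b : Int)] := by
        rw [hfind2]
        simp only [hgap, PySem.List.index?_eq_idxOf?, hidx]
        cases hr : List.idxOf? 40 (code.drop (a + 1)) with
        | none =>
          have hnm : (40 : Int) ∉ (code.drop (a + 1)).take (b - (a + 1)) := by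
            rw [← List.isSome_idxOf?, hidx, hr]
            simp
          simp [hnm, hr]
        | some i =>
          by_cases hib : i < b - (a + 1)
          · have hmem : (40 : Int) ∈ (code.drop (a + 1)).take (b - (a + 1)) := by
              rw [← List.isSome_idxOf?, hidx, hr]
              simp [hib]
            have hlt : ((a : Nat) : Int) + 1 + ((i : Nat) : Int) < ((b : Nat) : Int) := by
              have := hab; push_cast; omega
            push_cast
            simp [hmem, hib, hlt]
          · have hnm : (40 : Int) ∉ (code.drop (a + 1)).take (b - (a + 1)) := by
              rw [← List.isSome_idxOf?, hidx, hr]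
              simp [hib]
            have hge : ¬ ((a : Nat) : Int) + 1 + ((i : Nat) : Int) < ((b : Nat) : Int) := by
              have := hab; push_cast; omega
            push_cast
            simp [hnm, hib, hge]
      rw [hnote]
      exact ih k' (notes ++ [_]) (List.pairwise_cons.mp hpw).2
        (fun i hi hik c hc => by
          have hc' : b = c := by simpa using hc
          subst hc'
          have := c1 i hi hik
          have : L[i] ≤ (a : Int) := this
          have hab' : (a : Int) ≤ (b : Int) := by exact_mod_cast Nat.le_of_lt hab
          omega)

-- the A-side gap body, as a function of the two PHP positions
def gBody (code : List Int) (ns : List String) (gs ge : Int) : List String :=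
  let gap := PySem.List.slice code (some (gs + 1)) (some ge)
  if !(gap.contains 40) then ns ++ [pvTrimNote gs ge]
  else ns ++ [pvFlushNote (gs + 1 + (((PySem.List.index? gap 40).getD 0 : Nat) : Int)) gs ge]

-- A's index loop over pyRange equals the fold over zipped consecutive pairs
lemma foldRZ (g : List String → Int → Int → List String) (ts : List Int) (notes : List String) :
    (PySem.List.pyRange 0 ((ts.length : Int) - 1) 1).foldl
        (fun ns j => g ns (PySem.List.pyGetD ts j 0) (PySem.List.pyGetD ts (j + 1) 0)) notes
      = (ts.zip ts.tail).foldl (fun ns ab => g ns ab.1 ab.2) notes := by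
  cases ts with
  | nil =>
    rw [PySem.List.pyRange_one_eq_nil (by simp)]
    simp
  | cons x t =>
    have hlen : (((x :: t).length : Nat) : Int) - 1 = ((t.length : Nat) : Int) := by
      simp
    rw [hlen, PySem.List.pyRange_zero_natCast, List.foldl_map]
    have hfun : (fun (ns : List String) (k : Nat) =>
          g ns (PySem.List.pyGetD (x :: t) ((k : Nat) : Int) 0)
               (PySem.List.pyGetD (x :: t) (((k : Nat) : Int) + 1) 0))
        = fun ns k => g ns ((x :: t).getD k 0) ((x :: t).getD (k + 1) 0) := by
      funext ns k
      have hc : (((k : Nat) : Int) + 1) = (((k + 1 : Nat) : Nat) : Int) := by push_cast; ring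
      rw [hc, PySem.List.pyGetD_natCast, PySem.List.pyGetD_natCast]
    rw [hfun]
    have h := foldRZN g (x :: t) notes
    simpa using h

-- ===== VERDICT (by name: the statement is the Claim_ definition above) =====
theorem check_peephole_trim_spec : Claim_equal_check_peephole_trim := by
  intro code _
  unfold Spec_check_peephole_trim check_peephole_trim check_peephole_trim_alt
  simp only [letFun]
  have h00 : (0 : Int) = ((0 : Nat) : Int) := by simp
  have hA : (PySem.List.enumerate code 0).foldl
      (fun ts p => if p.2 == 8 then ts ++ [p.1] else ts) []
      = (posN code 0 8).map (fun (n : Nat) => (n : Int)) := by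
    rw [foldA_collect, h00, enumFilter_eq_posN]
    simp
  have hB : (PySem.List.enumerate code 0).foldl
      (fun st (p : Int × Int) =>
        if p.2 == 8 then (st.1 ++ [p.1], st.2)
        else if p.2 == 40 then (st.1, st.2 ++ [p.1]) else st) ([], [])
      = ((posN code 0 8).map (fun (n : Nat) => (n : Int)),
         (posN code 0 40).map (fun (n : Nat) => (n : Int))) := by
    rw [foldB_collect, h00, enumFilter_eq_posN, enumFilter_eq_posN]
    simp
  have hc8 : code.foldl (fun acc b => if b == 8 then acc + 1 else acc) (0 : Int)
      = ((posN code 0 8).length : Int) := by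
    rw [PySem.List.foldl_beq_add_one]
    rw [show List.count (8 : Int) code = code.count 8 from rfl, count_eq_posN_length code 8 0]
    simp
  have hc40 : code.foldl (fun acc b => if b == 40 then acc + 1 else acc) (0 : Int)
      = ((posN code 0 40).length : Int) := by
    rw [PySem.List.foldl_beq_add_one]
    rw [show List.count (40 : Int) code = code.count 40 from rfl, count_eq_posN_length code 40 0]
    simp
  rw [hA, hB, hc8, hc40]
  set P8 := posN code 0 8 with hP8
  set P40 := posN code 0 40 with hP40
  have hnn : (if ((P8.length : Int)) ≠ ((P40.length : Int)) then
        [pvMismatchNote (P8.length : Int) (P40.length : Int)] else ([] : List String))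
      = (if (P8.map (fun (n : Nat) => (n : Int))).length ≠ (P40.map (fun (n : Nat) => (n : Int))).length then
        [pvMismatchNote ((P8.map (fun (n : Nat) => (n : Int))).length : Int)
          ((P40.map (fun (n : Nat) => (n : Int))).length : Int)] else ([] : List String)) := by
    by_cases h : P8.length = P40.length <;> simp [h]
  rw [hnn]
  set notes0 := (if (P8.map (fun (n : Nat) => (n : Int))).length ≠ (P40.map (fun (n : Nat) => (n : Int))).length then
        [pvMismatchNote ((P8.map (fun (n : Nat) => (n : Int))).length : Int)
          ((P40.map (fun (n : Nat) => (n : Int))).length : Int)] else ([] : List String)) with hnotes0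
  have hzip := pairLoop_eq code P8 0 notes0 (posN_pairwise code 0 8)
    (fun i hi hik => by omega)
  have hrz := foldRZ (gBody code) (P8.map (fun (n : Nat) => (n : Int))) notes0
  by_cases h2 : 2 ≤ (P8.map (fun (n : Nat) => (n : Int))).length
  · rw [if_pos h2]
    exact hrz.trans hzip
  · rw [if_neg h2]
    have hz : ((P8.map (fun (n : Nat) => (n : Int))).zip
        (P8.map (fun (n : Nat) => (n : Int))).tail) = [] := by
      cases hP : P8 with
      | nil => simp
      | cons x t =>
        cases t with
        | nil => simp
        | cons y u => rw [hP] at h2; simp at h2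
    rw [← hzip, hz]
    simp
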